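-- pv_equiv track=rewrite | github.com/Matrixxboy/TheAstroPulse | backend/birthchart/birthchart.py | calculate_driver_connector_kua
-- ===== SOURCE A (Python) =====
-- def reduce_to_single_digit(n):
--     while n > 9:
--         n = sum(int(d) for d in str(n))
--     return n
--
-- def calculate_driver_connector_kua(day, month, year, gender):
--     driver = day if day < 10 else int(str(day)[0])
--     connector = sum(int(d) for d in f"{day:02d}{month:02d}{year}")
--     connector = reduce_to_single_digit(connector)
--
--     year_sum = sum(int(d) for d in str(year))
--     reduced_year = reduce_to_single_digit(year_sum)
--
--     if gender.lower() == 'male':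
--         kua = 11 - reduced_year
--     else:
--         kua = reduced_year + 4
--
--     kua = reduce_to_single_digit(kua)
--     if kua == 5:
--         kua = 2 if gender.lower() == 'male' else 8
--
--     return driver, connector, kua
-- ===== SOURCE B (Python) =====
-- def _droot(n):
--     # digital root via closed form: reduce-to-single-digit without any loop
--     return 0 if n == 0 else 1 + (n - 1) % 9
--
-- def calculate_driver_connector_kua(day, month, year, gender):
--     d = day
--     while d >= 10:
--         d //= 10
--     driver = d
--     connector = _droot(day + month + year)
--     r = _droot(year)
--     male = gender.lower() == 'male'
--     kua = _droot(11 - r) if male else _droot(r + 4)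
--     if kua == 5:
--         kua = 2 if male else 8
--     return driver, connector, kua
-- ===== Notes on version B (the rewrite author's own statement) =====
-- stated objective: simpler
-- what changed: The while-loop digit-sum reductions are replaced by the closed-form digital root 0 if n==0 else 1+(n-1)%9 applied to day+month+year (and to year), and the first-digit-of-str(day) slice by repeated integer division; the gender/kua branching is unchanged.
import Mathlib
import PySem

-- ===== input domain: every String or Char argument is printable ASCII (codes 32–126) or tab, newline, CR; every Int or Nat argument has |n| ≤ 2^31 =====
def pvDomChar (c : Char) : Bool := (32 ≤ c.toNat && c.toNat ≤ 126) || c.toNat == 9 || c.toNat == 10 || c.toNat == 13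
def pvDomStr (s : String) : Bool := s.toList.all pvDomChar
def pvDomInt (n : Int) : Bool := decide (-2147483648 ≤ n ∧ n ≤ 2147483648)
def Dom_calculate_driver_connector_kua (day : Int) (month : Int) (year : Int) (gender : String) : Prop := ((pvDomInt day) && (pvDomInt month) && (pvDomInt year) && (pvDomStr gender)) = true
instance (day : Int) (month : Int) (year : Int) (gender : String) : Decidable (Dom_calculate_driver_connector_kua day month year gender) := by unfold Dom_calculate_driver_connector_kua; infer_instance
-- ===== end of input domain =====

-- B replaces A's while-loop digit-sum reductions by the closed-form digital root 1+(n-1)%9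
-- and the string-slicing first digit by repeated integer division (objective: simpler).

-- ===== PORT A =====

-- int(c) for one character c of the f-string (Python raises on '-'; Pre_ keeps all arguments ≥ 0, 0 is a dummy outside)
def pvCharVal (c : Char) : Int := (PySem.Int.ofChars? [c]).getD 0

-- sum(int(d) for d in s)
def pvDigitSum (cs : List Char) : Int := (cs.map pvCharVal).sum

-- f"{n:02d}": left-pad with '0' to width 2
def pvPad2 (cs : List Char) : List Char := if cs.length < 2 then '0' :: cs else cs

-- the next three lemmas are needed for the termination of reduce_to_single_digit
lemma pvToDigitsCore_eq (fuel : Nat) : ∀ (n : Nat) (ds : List Char), n < fuel →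
    Nat.toDigitsCore 10 fuel n ds
      = (if n = 0 then ['0'] else ((Nat.digits 10 n).map Nat.digitChar).reverse) ++ ds := by
  induction fuel with
  | zero => intro n ds h; omega
  | succ f ih =>
    intro n ds h
    rw [Nat.toDigitsCore]
    by_cases h0 : n = 0
    · subst h0; simp; decide
    · by_cases h10 : n / 10 = 0
      · simp only [h10, if_pos, if_neg h0]
        rw [Nat.digits_def' (by norm_num : (1:Nat) < 10) (Nat.pos_of_ne_zero h0), h10]
        have hm : n % 10 = n := by omega
        simp [hm]
      · simp only [if_neg h10]
        rw [ih (n/10) _ (by omega), if_neg h10]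
        rw [if_neg h0, Nat.digits_def' (by norm_num : (1:Nat) < 10) (Nat.pos_of_ne_zero h0)]
        simp

lemma pvToChars_eq (n : Int) (h : 0 ≤ n) :
    PySem.Int.toChars n
      = if n.toNat = 0 then ['0'] else ((Nat.digits 10 n.toNat).map Nat.digitChar).reverse := by
  rw [PySem.Int.toChars, if_neg (by omega), Nat.toDigits,
      pvToDigitsCore_eq _ _ _ (Nat.lt_succ_self _), List.append_nil]

lemma pvCharVal_digitChar (d : Nat) (h : d < 10) : pvCharVal (Nat.digitChar d) = (d : Int) := by
  interval_cases d <;> decide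

lemma pvDigitSum_toChars_eq (n : Int) (h : 0 ≤ n) :
    pvDigitSum (PySem.Int.toChars n) = ((Nat.digits 10 n.toNat).sum : Int) := by
  rw [pvToChars_eq n h]
  by_cases h0 : n.toNat = 0
  · rw [if_pos h0, h0]; decide
  · rw [if_neg h0]
    unfold pvDigitSum
    rw [List.map_reverse, List.sum_reverse, List.map_map]
    simp only [Function.comp_def]
    rw [List.map_congr_left (fun d hd => pvCharVal_digitChar d
      (Nat.digits_lt_base (by norm_num) hd))]
    exact (Nat.cast_list_sum _).symm

lemma pvDigitSum_lt (n : Int) (h : 9 < n) :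
    (pvDigitSum (PySem.Int.toChars n)).toNat < n.toNat := by
  rw [pvDigitSum_toChars_eq n (by omega)]
  have hm : 10 ≤ n.toNat := by omega
  rw [Nat.digits_def' (by norm_num : (1:Nat) < 10) (by omega)]
  have h2 := Nat.digit_sum_le 10 (n.toNat / 10)
  simp only [List.sum_cons]
  omega

-- while n > 9: n = sum(int(d) for d in str(n))
def reduce_to_single_digit (n : Int) : Int :=
  if h : 9 < n then reduce_to_single_digit (pvDigitSum (PySem.Int.toChars n)) else n
termination_by n.toNat
decreasing_by exact pvDigitSum_lt n h

def calculate_driver_connector_kua (day : Int) (month : Int) (year : Int) (gender : String) : Int × Int × Int :=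
  let driver := if day < 10 then day else
    (match PySem.Str.pyGet? (PySem.Int.toStr day) 0 with
     | some c => (PySem.Int.ofChars? [c]).getD 0
     | none => 0)
  let connector0 := pvDigitSum (pvPad2 (PySem.Int.toChars day) ++ pvPad2 (PySem.Int.toChars month)
                     ++ PySem.Int.toChars year)
  let connector := reduce_to_single_digit connector0
  let year_sum := pvDigitSum (PySem.Int.toChars year)
  let reduced_year := reduce_to_single_digit year_sum
  let kua0 := if PySem.Str.lower gender = "male" then 11 - reduced_year else reduced_year + 4
  let kua1 := reduce_to_single_digit kua0
  let kua := if kua1 = 5 then (if PySem.Str.lower gender = "male" then 2 else 8) else kua1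
  (driver, connector, kua)

-- ===== PORT B =====

-- 0 if n == 0 else 1 + (n - 1) % 9
def pvDroot (n : Int) : Int := if n = 0 then 0 else 1 + PySem.Int.mod (n - 1) 9

-- d = day; while d >= 10: d //= 10
def pvFirstDigit (d : Int) : Int :=
  if h : 10 ≤ d then pvFirstDigit (PySem.Int.floordiv d 10) else d
termination_by d.toNat
decreasing_by
  rw [PySem.Int.floordiv_eq_ediv_of_pos (by norm_num : (0:Int) < 10)]
  omega

def calculate_driver_connector_kua_alt (day : Int) (month : Int) (year : Int) (gender : String) : Int × Int × Int :=
  let driver := pvFirstDigit day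
  let connector := pvDroot (day + month + year)
  let r := pvDroot year
  let kua0 := if PySem.Str.lower gender = "male" then pvDroot (11 - r) else pvDroot (r + 4)
  let kua := if kua0 = 5 then (if PySem.Str.lower gender = "male" then 2 else 8) else kua0
  (driver, connector, kua)

-- ===== PRECONDITION & SPEC =====
-- Python A raises ValueError (int('-')) whenever day, month or year is negative; Pre_ excludes exactly those inputs.
def Pre_calculate_driver_connector_kua (day : Int) (month : Int) (year : Int) (gender : String) : Prop :=
  0 ≤ day ∧ 0 ≤ month ∧ 0 ≤ year
instance (day : Int) (month : Int) (year : Int) (gender : String) : Decidable (Pre_calculate_driver_connector_kua day month year gender) := by unfold Pre_calculate_driver_connector_kua; infer_instance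

def pvWitness_calculate_driver_connector_kua : Int × Int × Int × String := (5, 1, 2000, "male")

def Spec_calculate_driver_connector_kua (day : Int) (month : Int) (year : Int) (gender : String) (out : Int × Int × Int) : Prop := out = calculate_driver_connector_kua_alt day month year gender
instance (day : Int) (month : Int) (year : Int) (gender : String) (out : Int × Int × Int) : Decidable (Spec_calculate_driver_connector_kua day month year gender out) := by unfold Spec_calculate_driver_connector_kua; infer_instance

-- ===== CLAIM =====
def Claim_equal_calculate_driver_connector_kua : Prop := ∀ (day : Int) (month : Int) (year : Int) (gender : String), Dom_calculate_driver_connector_kua day month year gender → Pre_calculate_driver_connector_kua day month year gender → Spec_calculate_driver_connector_kua day month year gender (calculate_driver_connector_kua day month year gender)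

-- ===== LEMMAS AND PROOFS =====

lemma pvDroot_bounds (n : Int) (h : 0 ≤ n) : 0 ≤ pvDroot n ∧ pvDroot n ≤ 9 := by
  unfold pvDroot
  split
  · omega
  · rw [PySem.Int.mod_eq_emod_of_pos (by norm_num)]; omega

lemma pvDroot_eq_self (n : Int) (h0 : 0 ≤ n) (h9 : n ≤ 9) : pvDroot n = n := by
  unfold pvDroot
  split
  · omega
  · rw [PySem.Int.mod_eq_emod_of_pos (by norm_num)]; omega

lemma pvDroot_congr (m n : Int) (h1 : 1 ≤ m) (h2 : 1 ≤ n) (h : m % 9 = n % 9) :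
    pvDroot m = pvDroot n := by
  unfold pvDroot
  rw [if_neg (by omega), if_neg (by omega),
      PySem.Int.mod_eq_emod_of_pos (by norm_num), PySem.Int.mod_eq_emod_of_pos (by norm_num)]
  omega

lemma pvSumDigitsPos (m : Nat) (hm : m ≠ 0) : 0 < (Nat.digits 10 m).sum := by
  rcases Nat.eq_zero_or_pos (Nat.digits 10 m).sum with h0 | h
  · exact absurd (List.sum_eq_zero_iff_forall_eq_nat.mp h0 _ (List.getLast_mem _))
      (Nat.getLast_digit_ne_zero 10 hm)
  · exact h

lemma pvSumDigits_mod9 (m : Nat) : m % 9 = (Nat.digits 10 m).sum % 9 :=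
  Nat.modEq_nine_digits_sum m

lemma pvReduce_eq_droot (n : Int) (h : 0 ≤ n) : reduce_to_single_digit n = pvDroot n := by
  by_cases hgt : 9 < n
  · have hds := pvDigitSum_toChars_eq n h
    have hlt := pvDigitSum_lt n hgt
    have hpos : 0 < (Nat.digits 10 n.toNat).sum := pvSumDigitsPos n.toNat (by omega)
    have hmod := pvSumDigits_mod9 n.toNat
    rw [reduce_to_single_digit, dif_pos hgt,
        pvReduce_eq_droot _ (by rw [hds]; positivity)]
    rw [hds]
    apply pvDroot_congr _ _ (by omega) (by omega)
    omega
  · rw [reduce_to_single_digit, dif_neg hgt, pvDroot_eq_self n h (by omega)]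
termination_by n.toNat
decreasing_by exact pvDigitSum_lt n hgt

lemma pvCharVal_zeroChar : pvCharVal '0' = 0 := by decide

lemma pvDigitSum_append (a b : List Char) : pvDigitSum (a ++ b) = pvDigitSum a + pvDigitSum b := by
  unfold pvDigitSum; rw [List.map_append, List.sum_append]

lemma pvDigitSum_pad2 (cs : List Char) : pvDigitSum (pvPad2 cs) = pvDigitSum cs := by
  unfold pvPad2
  split
  · unfold pvDigitSum; simp [pvCharVal_zeroChar]
  · rfl

-- droot of the summed digit sums = droot of the summed numbers
lemma pvDroot_three_sums (a b c : Int) (ha : 0 ≤ a) (hb : 0 ≤ b) (hc : 0 ≤ c) :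
    pvDroot (pvDigitSum (PySem.Int.toChars a) + pvDigitSum (PySem.Int.toChars b)
      + pvDigitSum (PySem.Int.toChars c)) = pvDroot (a + b + c) := by
  rw [pvDigitSum_toChars_eq a ha, pvDigitSum_toChars_eq b hb, pvDigitSum_toChars_eq c hc]
  by_cases h0 : a + b + c = 0
  · have h1 : a.toNat = 0 ∧ b.toNat = 0 ∧ c.toNat = 0 := by omega
    rw [h1.1, h1.2.1, h1.2.2, h0]; decide
  · have hma := pvSumDigits_mod9 a.toNat
    have hmb := pvSumDigits_mod9 b.toNat
    have hmc := pvSumDigits_mod9 c.toNat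
    have hp : 0 < a.toNat ∨ 0 < b.toNat ∨ 0 < c.toNat := by omega
    have hsp : 1 ≤ ((Nat.digits 10 a.toNat).sum : Int) + ((Nat.digits 10 b.toNat).sum : Int)
        + ((Nat.digits 10 c.toNat).sum : Int) := by
      rcases hp with hx | hx | hx
      · have := pvSumDigitsPos a.toNat (by omega); omega
      · have := pvSumDigitsPos b.toNat (by omega); omega
      · have := pvSumDigitsPos c.toNat (by omega); omega
    apply pvDroot_congr _ _ hsp (by omega)
    omega

lemma pvDroot_digitSum (a : Int) (ha : 0 ≤ a) :
    pvDroot (pvDigitSum (PySem.Int.toChars a)) = pvDroot a := by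
  rw [pvDigitSum_toChars_eq a ha]
  by_cases h0 : a = 0
  · have : a.toNat = 0 := by omega
    rw [this, h0]; decide
  · have hm := pvSumDigits_mod9 a.toNat
    have hp := pvSumDigitsPos a.toNat (by omega)
    apply pvDroot_congr _ _ (by omega) (by omega)
    omega

lemma pvGetLastD_of_ne_nil {α : Type} (l : List α) (h : l ≠ []) (a b : α) :
    l.getLastD a = l.getLastD b := by
  cases hl : l.getLast? with
  | none => exact absurd (List.getLast?_eq_none_iff.mp hl) h
  | some x => rw [List.getLastD_eq_getLast?, List.getLastD_eq_getLast?, hl]; rfl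

lemma pvFirstDigit_eq (n : Int) (h : 1 ≤ n) :
    pvFirstDigit n = ((Nat.digits 10 n.toNat).getLastD 0 : Int) := by
  by_cases h10 : 10 ≤ n
  · rw [pvFirstDigit, dif_pos h10,
        PySem.Int.floordiv_eq_ediv_of_pos (by norm_num : (0:Int) < 10)]
    have hq : (n / 10).toNat = n.toNat / 10 := by omega
    rw [pvFirstDigit_eq (n / 10) (by omega), hq]
    rw [Nat.digits_def' (by norm_num : (1:Nat) < 10) (by omega : 0 < n.toNat),
        List.getLastD_cons]
    exact congrArg _ (pvGetLastD_of_ne_nil _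
      (Nat.digits_ne_nil_iff_ne_zero.mpr (by omega)) _ _).symm
  · rw [pvFirstDigit, dif_neg h10]
    rw [Nat.digits_def' (by norm_num : (1:Nat) < 10) (by omega : 0 < n.toNat)]
    have h1 : n.toNat % 10 = n.toNat := by omega
    have h2 : n.toNat / 10 = 0 := by omega
    rw [h2, h1, Nat.digits_zero, List.getLastD_cons, List.getLastD_nil]
    omega
termination_by n.toNat
decreasing_by omega

lemma pvDriver_eq (day : Int) (h : 0 ≤ day) :
    (if day < 10 then day else
      (match PySem.Str.pyGet? (PySem.Int.toStr day) 0 with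
       | some c => (PySem.Int.ofChars? [c]).getD 0
       | none => 0)) = pvFirstDigit day := by
  by_cases h10 : day < 10
  · rw [if_pos h10, pvFirstDigit, dif_neg (by omega)]
  · rw [if_neg h10]
    have hm : day.toNat ≠ 0 := by omega
    have hne : (Nat.digits 10 day.toNat) ≠ [] := Nat.digits_ne_nil_iff_ne_zero.mpr hm
    have hchars : PySem.Str.pyGet? (PySem.Int.toStr day) 0
        = (((Nat.digits 10 day.toNat).map Nat.digitChar).reverse).head? := by
      rw [PySem.Str.pyGet?, PySem.Chars.pyGet?, PySem.Int.toList_toStr,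
          pvToChars_eq day h, if_neg hm]
      cases hc : ((Nat.digits 10 day.toNat).map Nat.digitChar).reverse with
      | nil => exact absurd (by simpa using hc) hne
      | cons x t => simp [PySem.List.pyGet?, PySem.List.pyIdx?]
    rw [pvFirstDigit_eq day (by omega), List.getLastD_eq_getLast?]
    cases hl : (Nat.digits 10 day.toNat).getLast? with
    | none => exact absurd (List.getLast?_eq_none_iff.mp hl) hne
    | some g =>
      have hg10 : g < 10 := Nat.digits_lt_base (by norm_num) (List.mem_of_getLast? hl)
      simp only [hchars, List.head?_reverse, List.getLast?_map, hl, Option.map_some]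
      rw [show ((PySem.Int.ofChars? [Nat.digitChar g]).getD 0) = (g : Int) from
        pvCharVal_digitChar g hg10]
      rfl

lemma pvDigitSum_toChars_nonneg (a : Int) (ha : 0 <= a) : 0 <= pvDigitSum (PySem.Int.toChars a) := by
  rw [pvDigitSum_toChars_eq a ha]; positivity

-- ===== VERDICT =====
theorem calculate_driver_connector_kua_spec : Claim_equal_calculate_driver_connector_kua := by
  intro day month year gender _ hpre
  obtain ⟨hd, hm, hy⟩ := hpre
  unfold Spec_calculate_driver_connector_kua
  simp only [calculate_driver_connector_kua, calculate_driver_connector_kua_alt]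
  have hda := pvDigitSum_toChars_nonneg day hd
  have hmo := pvDigitSum_toChars_nonneg month hm
  have hye := pvDigitSum_toChars_nonneg year hy
  have hry := pvDroot_bounds year hy
  rw [pvDriver_eq day hd]
  rw [pvDigitSum_append, pvDigitSum_append, pvDigitSum_pad2, pvDigitSum_pad2]
  rw [pvReduce_eq_droot _ (by omega), pvDroot_three_sums day month year hd hm hy]
  rw [pvReduce_eq_droot _ hye, pvDroot_digitSum year hy]
  by_cases hg : PySem.Str.lower gender = "male"
  · rw [if_pos hg, if_pos hg, pvReduce_eq_droot _ (by omega)]; simp [hg]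
  · rw [if_neg hg, if_neg hg, pvReduce_eq_droot _ (by omega)]; simp [hg]
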